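-- pv_equiv track=rewrite | github.com/algowizzzz/ccr_calculators | chunk_complete_metrics_balanced.py | categorize_metric_balanced
-- ===== SOURCE A (Python) =====
-- def categorize_metric_balanced(metric_name, metric_info):
--     """Context-aware balanced categorization into 8 business function chunks"""
--     name_lower = metric_name.lower()
--     label_lower = (metric_info.get('label') or '').lower()
--     desc_lower = (metric_info.get('description') or '').lower()
--
--     combined_text = f"{name_lower} {label_lower} {desc_lower}"
--
--     # Priority 1: Cash & Cash Equivalents (High liquidity)
--     if any(term in combined_text for term in [
--         'cash', 'equivalent', 'deposits', 'money', 'treasury', 'federal',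
--         'centralbank', 'overnight', 'shortterm', 'liquidity'
--     ]) and not any(term in combined_text for term in ['loan', 'credit', 'financing', 'securities']):
--         return 'cash_equivalents'
--
--     # Priority 2: Securities & Investments (Investment portfolio)
--     elif any(term in combined_text for term in [
--         'securities', 'available', 'held', 'trading', 'investment',
--         'equity', 'debt', 'bond', 'marketable', 'portfolio'
--     ]) and not any(term in combined_text for term in ['loan', 'credit', 'financing']):
--         return 'securities_investments'
--
--     # Priority 3: Other Assets (Remaining asset items)
--     elif any(term in combined_text for term in [
--         'asset', 'receivable', 'accrued', 'prepaid', 'goodwill',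
--         'intangible', 'property', 'equipment', 'building'
--     ]) and not any(term in combined_text for term in ['loan', 'credit', 'financing', 'liability', 'deposit']):
--         return 'other_assets'
--
--     # Priority 4: Liabilities & Deposits (Funding sources)
--     elif any(term in combined_text for term in [
--         'liability', 'deposit', 'payable', 'debt', 'borrowing', 'obligation',
--         'due', 'accrued', 'customer', 'demand', 'time', 'savings'
--     ]):
--         return 'liabilities_deposits'
--
--     # Priority 5: Loans & Credit (Credit portfolio)
--     elif any(term in combined_text for term in [
--         'loan', 'credit', 'financing', 'mortgage', 'commercial', 'consumer',
--         'lease', 'allowance', 'provision', 'impairment', 'chargeoff', 'nonperforming'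
--     ]):
--         return 'loans_credit'
--
--     # Priority 6: Revenue & Profitability (Income statement)
--     elif any(term in combined_text for term in [
--         'revenue', 'income', 'interest', 'fee', 'earnings', 'profit',
--         'gain', 'loss', 'margin', 'yield', 'dividend', 'commission'
--     ]):
--         return 'revenue_profit'
--
--     # Priority 7: Risk & Capital Management (Regulatory/Risk)
--     elif any(term in combined_text for term in [
--         'capital', 'risk', 'tier', 'ratio', 'adequacy', 'leverage',
--         'regulatory', 'basel', 'rwa', 'cet1', 'buffer'
--     ]):
--         return 'risk_capital'
--
--     # Priority 8: Operations & Metadata (Everything else)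
--     else:
--         return 'operations_metadata'
-- ===== SOURCE B (Python) =====
-- # Inverted keyword index + bitmask accumulation: one pass over a flat keyword table
-- # collects include/exclude bits per category, then the lowest set surviving bit wins.
-- CATEGORIES = [
--     'cash_equivalents', 'securities_investments', 'other_assets',
--     'liabilities_deposits', 'loans_credit', 'revenue_profit', 'risk_capital',
-- ]
--
-- # keyword -> (include bitmask, exclude bitmask) over the 7 category bits above
-- KEYWORD_BITS = {
--     'cash': (1, 0),
--     'equivalent': (1, 0),
--     'deposits': (1, 0),
--     'money': (1, 0),
--     'treasury': (1, 0),
--     'federal': (1, 0),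
--     'centralbank': (1, 0),
--     'overnight': (1, 0),
--     'shortterm': (1, 0),
--     'liquidity': (1, 0),
--     'loan': (16, 7),
--     'credit': (16, 7),
--     'financing': (16, 7),
--     'securities': (2, 1),
--     'available': (2, 0),
--     'held': (2, 0),
--     'trading': (2, 0),
--     'investment': (2, 0),
--     'equity': (2, 0),
--     'debt': (10, 0),
--     'bond': (2, 0),
--     'marketable': (2, 0),
--     'portfolio': (2, 0),
--     'asset': (4, 0),
--     'receivable': (4, 0),
--     'accrued': (12, 0),
--     'prepaid': (4, 0),
--     'goodwill': (4, 0),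
--     'intangible': (4, 0),
--     'property': (4, 0),
--     'equipment': (4, 0),
--     'building': (4, 0),
--     'liability': (8, 4),
--     'deposit': (8, 4),
--     'payable': (8, 0),
--     'borrowing': (8, 0),
--     'obligation': (8, 0),
--     'due': (8, 0),
--     'customer': (8, 0),
--     'demand': (8, 0),
--     'time': (8, 0),
--     'savings': (8, 0),
--     'mortgage': (16, 0),
--     'commercial': (16, 0),
--     'consumer': (16, 0),
--     'lease': (16, 0),
--     'allowance': (16, 0),
--     'provision': (16, 0),
--     'impairment': (16, 0),
--     'chargeoff': (16, 0),
--     'nonperforming': (16, 0),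
--     'revenue': (32, 0),
--     'income': (32, 0),
--     'interest': (32, 0),
--     'fee': (32, 0),
--     'earnings': (32, 0),
--     'profit': (32, 0),
--     'gain': (32, 0),
--     'loss': (32, 0),
--     'margin': (32, 0),
--     'yield': (32, 0),
--     'dividend': (32, 0),
--     'commission': (32, 0),
--     'capital': (64, 0),
--     'risk': (64, 0),
--     'tier': (64, 0),
--     'ratio': (64, 0),
--     'adequacy': (64, 0),
--     'leverage': (64, 0),
--     'regulatory': (64, 0),
--     'basel': (64, 0),
--     'rwa': (64, 0),
--     'cet1': (64, 0),
--     'buffer': (64, 0),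
-- }
--
--
-- def categorize_metric_balanced(metric_name, metric_info):
--     """Context-aware balanced categorization into 8 business function chunks"""
--     combined_text = "{} {} {}".format(
--         metric_name.lower(),
--         (metric_info.get('label') or '').lower(),
--         (metric_info.get('description') or '').lower(),
--     )
--     inc = 0
--     exc = 0
--     for term, (im, em) in KEYWORD_BITS.items():
--         if term in combined_text:
--             inc |= im
--             exc |= em
--     for i, cat in enumerate(CATEGORIES):
--         if (inc >> i) & 1 and not (exc >> i) & 1:
--             return cat
--     return 'operations_metadata'
-- ===== Notes on version B (the rewrite author's own statement) =====
-- stated objective: alternative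
-- what changed: Replaces the if/elif keyword cascade with an inverted index: a flat keyword->(include,exclude) bitmask table scanned in one pass to accumulate two category bit masks, then the lowest set include bit not cancelled by an exclude bit selects the category.
import Mathlib
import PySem

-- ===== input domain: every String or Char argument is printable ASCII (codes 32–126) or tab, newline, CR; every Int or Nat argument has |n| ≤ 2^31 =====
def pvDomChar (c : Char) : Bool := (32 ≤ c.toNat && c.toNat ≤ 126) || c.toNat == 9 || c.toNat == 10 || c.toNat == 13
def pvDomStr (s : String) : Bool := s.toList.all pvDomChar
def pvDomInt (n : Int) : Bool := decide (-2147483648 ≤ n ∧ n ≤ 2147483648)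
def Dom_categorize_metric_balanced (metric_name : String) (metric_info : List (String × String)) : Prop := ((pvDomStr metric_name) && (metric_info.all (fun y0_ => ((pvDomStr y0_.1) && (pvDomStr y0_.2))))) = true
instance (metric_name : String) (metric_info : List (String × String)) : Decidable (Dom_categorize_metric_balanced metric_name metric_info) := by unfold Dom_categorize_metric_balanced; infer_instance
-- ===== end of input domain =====

-- B replaces A's if/elif keyword cascade by an inverted keyword→bitmask index: one pass over a
-- flat keyword table accumulates include/exclude category bits, then the lowest surviving bit wins
-- (objective: alternative data structure; same asymptotic cost).

-- ===== PORT A =====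
-- literal transliteration of A's if/elif cascade
def categorize_metric_balanced (metric_name : String) (metric_info : List (String × String)) : String :=
  let name_lower := PySem.Str.lower metric_name
  let label_lower := PySem.Str.lower (((PySem.Dict.mk metric_info).get? "label").getD "")
  let desc_lower := PySem.Str.lower (((PySem.Dict.mk metric_info).get? "description").getD "")
  let combined_text := name_lower ++ " " ++ label_lower ++ " " ++ desc_lower
  if (["cash", "equivalent", "deposits", "money", "treasury", "federal", "centralbank", "overnight", "shortterm", "liquidity"].any (fun term => PySem.Str.isIn term combined_text)) &&
     !(["loan", "credit", "financing", "securities"].any (fun term => PySem.Str.isIn term combined_text)) then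
    "cash_equivalents"
  else if (["securities", "available", "held", "trading", "investment", "equity", "debt", "bond", "marketable", "portfolio"].any (fun term => PySem.Str.isIn term combined_text)) &&
     !(["loan", "credit", "financing"].any (fun term => PySem.Str.isIn term combined_text)) then
    "securities_investments"
  else if (["asset", "receivable", "accrued", "prepaid", "goodwill", "intangible", "property", "equipment", "building"].any (fun term => PySem.Str.isIn term combined_text)) &&
     !(["loan", "credit", "financing", "liability", "deposit"].any (fun term => PySem.Str.isIn term combined_text)) then
    "other_assets"
  else if (["liability", "deposit", "payable", "debt", "borrowing", "obligation", "due", "accrued", "customer", "demand", "time", "savings"].any (fun term => PySem.Str.isIn term combined_text)) then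
    "liabilities_deposits"
  else if (["loan", "credit", "financing", "mortgage", "commercial", "consumer", "lease", "allowance", "provision", "impairment", "chargeoff", "nonperforming"].any (fun term => PySem.Str.isIn term combined_text)) then
    "loans_credit"
  else if (["revenue", "income", "interest", "fee", "earnings", "profit", "gain", "loss", "margin", "yield", "dividend", "commission"].any (fun term => PySem.Str.isIn term combined_text)) then
    "revenue_profit"
  else if (["capital", "risk", "tier", "ratio", "adequacy", "leverage", "regulatory", "basel", "rwa", "cet1", "buffer"].any (fun term => PySem.Str.isIn term combined_text)) then
    "risk_capital"
  else
    "operations_metadata"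

-- ===== PORT B =====
-- Source B's CATEGORIES list
def pvCategories : List String :=
  ["cash_equivalents", "securities_investments", "other_assets",
   "liabilities_deposits", "loans_credit", "revenue_profit", "risk_capital"]

-- Source B's KEYWORD_BITS dict, in insertion order: keyword -> (include mask, exclude mask)
def pvKeyTab : List (String × Nat × Nat) :=
  [   ("cash", 1, 0),
   ("equivalent", 1, 0),
   ("deposits", 1, 0),
   ("money", 1, 0),
   ("treasury", 1, 0),
   ("federal", 1, 0),
   ("centralbank", 1, 0),
   ("overnight", 1, 0),
   ("shortterm", 1, 0),
   ("liquidity", 1, 0),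
   ("loan", 16, 7),
   ("credit", 16, 7),
   ("financing", 16, 7),
   ("securities", 2, 1),
   ("available", 2, 0),
   ("held", 2, 0),
   ("trading", 2, 0),
   ("investment", 2, 0),
   ("equity", 2, 0),
   ("debt", 10, 0),
   ("bond", 2, 0),
   ("marketable", 2, 0),
   ("portfolio", 2, 0),
   ("asset", 4, 0),
   ("receivable", 4, 0),
   ("accrued", 12, 0),
   ("prepaid", 4, 0),
   ("goodwill", 4, 0),
   ("intangible", 4, 0),
   ("property", 4, 0),
   ("equipment", 4, 0),
   ("building", 4, 0),
   ("liability", 8, 4),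
   ("deposit", 8, 4),
   ("payable", 8, 0),
   ("borrowing", 8, 0),
   ("obligation", 8, 0),
   ("due", 8, 0),
   ("customer", 8, 0),
   ("demand", 8, 0),
   ("time", 8, 0),
   ("savings", 8, 0),
   ("mortgage", 16, 0),
   ("commercial", 16, 0),
   ("consumer", 16, 0),
   ("lease", 16, 0),
   ("allowance", 16, 0),
   ("provision", 16, 0),
   ("impairment", 16, 0),
   ("chargeoff", 16, 0),
   ("nonperforming", 16, 0),
   ("revenue", 32, 0),
   ("income", 32, 0),
   ("interest", 32, 0),
   ("fee", 32, 0),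
   ("earnings", 32, 0),
   ("profit", 32, 0),
   ("gain", 32, 0),
   ("loss", 32, 0),
   ("margin", 32, 0),
   ("yield", 32, 0),
   ("dividend", 32, 0),
   ("commission", 32, 0),
   ("capital", 64, 0),
   ("risk", 64, 0),
   ("tier", 64, 0),
   ("ratio", 64, 0),
   ("adequacy", 64, 0),
   ("leverage", 64, 0),
   ("regulatory", 64, 0),
   ("basel", 64, 0),
   ("rwa", 64, 0),
   ("cet1", 64, 0),
   ("buffer", 64, 0)]

-- Source B's accumulation loop: `for term, (im, em) in KEYWORD_BITS.items(): if term in combined_text: inc |= im; exc |= em`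
def pvAccum (combined_text : String) : Nat × Nat :=
  pvKeyTab.foldl
    (fun acc e => if PySem.Str.isIn e.1 combined_text then (acc.1 ||| e.2.1, acc.2 ||| e.2.2) else acc)
    (0, 0)

-- Source B's selection loop over enumerate(CATEGORIES); `(x >> i) & 1` truthiness on the nonnegative
-- masks built above is exactly Nat.testBit (indices i are the nonnegative enumerate indices)
def pvPick (inc exc : Nat) : List (Int × String) → String
  | [] => "operations_metadata"
  | (i, cat) :: rest => if inc.testBit i.toNat && !exc.testBit i.toNat then cat else pvPick inc exc rest

def categorize_metric_balanced_alt (metric_name : String) (metric_info : List (String × String)) : String :=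
  let combined_text :=
    PySem.Str.lower metric_name ++ " " ++
    PySem.Str.lower (((PySem.Dict.mk metric_info).get? "label").getD "") ++ " " ++
    PySem.Str.lower (((PySem.Dict.mk metric_info).get? "description").getD "")
  let acc := pvAccum combined_text
  pvPick acc.1 acc.2 (PySem.List.enumerate pvCategories)

-- ===== PRECONDITION & SPEC =====
def Spec_categorize_metric_balanced (metric_name : String) (metric_info : List (String × String)) (out : String) : Prop := out = categorize_metric_balanced_alt metric_name metric_info
instance (metric_name : String) (metric_info : List (String × String)) (out : String) : Decidable (Spec_categorize_metric_balanced metric_name metric_info out) := by unfold Spec_categorize_metric_balanced; infer_instance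

-- ===== CLAIM =====
def Claim_equal_categorize_metric_balanced : Prop := ∀ (metric_name : String) (metric_info : List (String × String)), Dom_categorize_metric_balanced metric_name metric_info → Spec_categorize_metric_balanced metric_name metric_info (categorize_metric_balanced metric_name metric_info)

-- ===== LEMMAS AND PROOFS =====

-- ground bits of the constant masks in pvKeyTab
@[simp] theorem pvTB_1_0 : Nat.testBit 1 0 = true := by decide
@[simp] theorem pvTB_1_1 : Nat.testBit 1 1 = false := by decide
@[simp] theorem pvTB_1_2 : Nat.testBit 1 2 = false := by decide
@[simp] theorem pvTB_1_3 : Nat.testBit 1 3 = false := by decide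
@[simp] theorem pvTB_1_4 : Nat.testBit 1 4 = false := by decide
@[simp] theorem pvTB_1_5 : Nat.testBit 1 5 = false := by decide
@[simp] theorem pvTB_1_6 : Nat.testBit 1 6 = false := by decide
@[simp] theorem pvTB_2_0 : Nat.testBit 2 0 = false := by decide
@[simp] theorem pvTB_2_1 : Nat.testBit 2 1 = true := by decide
@[simp] theorem pvTB_2_2 : Nat.testBit 2 2 = false := by decide
@[simp] theorem pvTB_2_3 : Nat.testBit 2 3 = false := by decide
@[simp] theorem pvTB_2_4 : Nat.testBit 2 4 = false := by decide
@[simp] theorem pvTB_2_5 : Nat.testBit 2 5 = false := by decide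
@[simp] theorem pvTB_2_6 : Nat.testBit 2 6 = false := by decide
@[simp] theorem pvTB_4_0 : Nat.testBit 4 0 = false := by decide
@[simp] theorem pvTB_4_1 : Nat.testBit 4 1 = false := by decide
@[simp] theorem pvTB_4_2 : Nat.testBit 4 2 = true := by decide
@[simp] theorem pvTB_4_3 : Nat.testBit 4 3 = false := by decide
@[simp] theorem pvTB_4_4 : Nat.testBit 4 4 = false := by decide
@[simp] theorem pvTB_4_5 : Nat.testBit 4 5 = false := by decide
@[simp] theorem pvTB_4_6 : Nat.testBit 4 6 = false := by decide
@[simp] theorem pvTB_7_0 : Nat.testBit 7 0 = true := by decide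
@[simp] theorem pvTB_7_1 : Nat.testBit 7 1 = true := by decide
@[simp] theorem pvTB_7_2 : Nat.testBit 7 2 = true := by decide
@[simp] theorem pvTB_7_3 : Nat.testBit 7 3 = false := by decide
@[simp] theorem pvTB_7_4 : Nat.testBit 7 4 = false := by decide
@[simp] theorem pvTB_7_5 : Nat.testBit 7 5 = false := by decide
@[simp] theorem pvTB_7_6 : Nat.testBit 7 6 = false := by decide
@[simp] theorem pvTB_8_0 : Nat.testBit 8 0 = false := by decide
@[simp] theorem pvTB_8_1 : Nat.testBit 8 1 = false := by decide
@[simp] theorem pvTB_8_2 : Nat.testBit 8 2 = false := by decide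
@[simp] theorem pvTB_8_3 : Nat.testBit 8 3 = true := by decide
@[simp] theorem pvTB_8_4 : Nat.testBit 8 4 = false := by decide
@[simp] theorem pvTB_8_5 : Nat.testBit 8 5 = false := by decide
@[simp] theorem pvTB_8_6 : Nat.testBit 8 6 = false := by decide
@[simp] theorem pvTB_10_0 : Nat.testBit 10 0 = false := by decide
@[simp] theorem pvTB_10_1 : Nat.testBit 10 1 = true := by decide
@[simp] theorem pvTB_10_2 : Nat.testBit 10 2 = false := by decide
@[simp] theorem pvTB_10_3 : Nat.testBit 10 3 = true := by decide
@[simp] theorem pvTB_10_4 : Nat.testBit 10 4 = false := by decide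
@[simp] theorem pvTB_10_5 : Nat.testBit 10 5 = false := by decide
@[simp] theorem pvTB_10_6 : Nat.testBit 10 6 = false := by decide
@[simp] theorem pvTB_12_0 : Nat.testBit 12 0 = false := by decide
@[simp] theorem pvTB_12_1 : Nat.testBit 12 1 = false := by decide
@[simp] theorem pvTB_12_2 : Nat.testBit 12 2 = true := by decide
@[simp] theorem pvTB_12_3 : Nat.testBit 12 3 = true := by decide
@[simp] theorem pvTB_12_4 : Nat.testBit 12 4 = false := by decide
@[simp] theorem pvTB_12_5 : Nat.testBit 12 5 = false := by decide
@[simp] theorem pvTB_12_6 : Nat.testBit 12 6 = false := by decide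
@[simp] theorem pvTB_16_0 : Nat.testBit 16 0 = false := by decide
@[simp] theorem pvTB_16_1 : Nat.testBit 16 1 = false := by decide
@[simp] theorem pvTB_16_2 : Nat.testBit 16 2 = false := by decide
@[simp] theorem pvTB_16_3 : Nat.testBit 16 3 = false := by decide
@[simp] theorem pvTB_16_4 : Nat.testBit 16 4 = true := by decide
@[simp] theorem pvTB_16_5 : Nat.testBit 16 5 = false := by decide
@[simp] theorem pvTB_16_6 : Nat.testBit 16 6 = false := by decide
@[simp] theorem pvTB_32_0 : Nat.testBit 32 0 = false := by decide
@[simp] theorem pvTB_32_1 : Nat.testBit 32 1 = false := by decide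
@[simp] theorem pvTB_32_2 : Nat.testBit 32 2 = false := by decide
@[simp] theorem pvTB_32_3 : Nat.testBit 32 3 = false := by decide
@[simp] theorem pvTB_32_4 : Nat.testBit 32 4 = false := by decide
@[simp] theorem pvTB_32_5 : Nat.testBit 32 5 = true := by decide
@[simp] theorem pvTB_32_6 : Nat.testBit 32 6 = false := by decide
@[simp] theorem pvTB_64_0 : Nat.testBit 64 0 = false := by decide
@[simp] theorem pvTB_64_1 : Nat.testBit 64 1 = false := by decide
@[simp] theorem pvTB_64_2 : Nat.testBit 64 2 = false := by decide
@[simp] theorem pvTB_64_3 : Nat.testBit 64 3 = false := by decide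
@[simp] theorem pvTB_64_4 : Nat.testBit 64 4 = false := by decide
@[simp] theorem pvTB_64_5 : Nat.testBit 64 5 = false := by decide
@[simp] theorem pvTB_64_6 : Nat.testBit 64 6 = true := by decide

-- the accumulated masks' bits are the ORs over the table (generic foldl/testBit lemma)
theorem pvFold_testBit (L : List (String × Nat × Nat)) (ct : String) (init : Nat × Nat) (i : Nat) :
    ((L.foldl
        (fun acc e => if PySem.Str.isIn e.1 ct then (acc.1 ||| e.2.1, acc.2 ||| e.2.2) else acc)
        init).1.testBit i
      = (init.1.testBit i || L.any (fun e => PySem.Str.isIn e.1 ct && e.2.1.testBit i)))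
    ∧ ((L.foldl
        (fun acc e => if PySem.Str.isIn e.1 ct then (acc.1 ||| e.2.1, acc.2 ||| e.2.2) else acc)
        init).2.testBit i
      = (init.2.testBit i || L.any (fun e => PySem.Str.isIn e.1 ct && e.2.2.testBit i))) := by
  induction L generalizing init with
  | nil => simp
  | cons e L ih =>
    rcases e with ⟨t, im, em⟩
    by_cases h : PySem.Str.isIn t ct = true
    · simp only [List.foldl_cons, List.any_cons, h, if_pos, Bool.true_and]
      rcases ih ((init.1 ||| im, init.2 ||| em)) with ⟨h1, h2⟩
      constructor
      · rw [h1]; simp [Nat.testBit_or, Bool.or_assoc]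
      · rw [h2]; simp [Nat.testBit_or, Bool.or_assoc]
    · rw [Bool.not_eq_true] at h
      simp only [List.foldl_cons, List.any_cons, h, Bool.false_and, Bool.false_or, if_neg Bool.false_ne_true]
      exact ih init


theorem pvIncBit_0 (ct : String) :
    (pvAccum ct).1.testBit 0 = (["cash", "equivalent", "deposits", "money", "treasury", "federal", "centralbank", "overnight", "shortterm", "liquidity"].any (fun term => PySem.Str.isIn term ct)) := by
  rw [pvAccum, (pvFold_testBit pvKeyTab ct (0,0) 0).1]
  simp only [pvKeyTab, List.any_cons, List.any_nil]
  simp only [pvTB_1_0, pvTB_16_0, pvTB_2_0, pvTB_10_0, pvTB_4_0, pvTB_12_0, pvTB_8_0, pvTB_32_0, pvTB_64_0]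
  simp only [Bool.and_true, Bool.and_false, Bool.or_false, Bool.false_or, Nat.zero_testBit]
  try ac_rfl

theorem pvExcBit_0 (ct : String) :
    (pvAccum ct).2.testBit 0 = (["loan", "credit", "financing", "securities"].any (fun term => PySem.Str.isIn term ct)) := by
  rw [pvAccum, (pvFold_testBit pvKeyTab ct (0,0) 0).2]
  simp only [pvKeyTab, List.any_cons, List.any_nil]
  simp only [pvTB_7_0, pvTB_1_0, pvTB_4_0]
  simp only [Bool.and_true, Bool.and_false, Bool.or_false, Bool.false_or, Nat.zero_testBit]
  try ac_rfl

theorem pvIncBit_1 (ct : String) :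
    (pvAccum ct).1.testBit 1 = (["securities", "available", "held", "trading", "investment", "equity", "debt", "bond", "marketable", "portfolio"].any (fun term => PySem.Str.isIn term ct)) := by
  rw [pvAccum, (pvFold_testBit pvKeyTab ct (0,0) 1).1]
  simp only [pvKeyTab, List.any_cons, List.any_nil]
  simp only [pvTB_1_1, pvTB_16_1, pvTB_2_1, pvTB_10_1, pvTB_4_1, pvTB_12_1, pvTB_8_1, pvTB_32_1, pvTB_64_1]
  simp only [Bool.and_true, Bool.and_false, Bool.or_false, Bool.false_or, Nat.zero_testBit]
  try ac_rfl

theorem pvExcBit_1 (ct : String) :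
    (pvAccum ct).2.testBit 1 = (["loan", "credit", "financing"].any (fun term => PySem.Str.isIn term ct)) := by
  rw [pvAccum, (pvFold_testBit pvKeyTab ct (0,0) 1).2]
  simp only [pvKeyTab, List.any_cons, List.any_nil]
  simp only [pvTB_7_1, pvTB_1_1, pvTB_4_1]
  simp only [Bool.and_true, Bool.and_false, Bool.or_false, Bool.false_or, Nat.zero_testBit]
  try ac_rfl

theorem pvIncBit_2 (ct : String) :
    (pvAccum ct).1.testBit 2 = (["asset", "receivable", "accrued", "prepaid", "goodwill", "intangible", "property", "equipment", "building"].any (fun term => PySem.Str.isIn term ct)) := by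
  rw [pvAccum, (pvFold_testBit pvKeyTab ct (0,0) 2).1]
  simp only [pvKeyTab, List.any_cons, List.any_nil]
  simp only [pvTB_1_2, pvTB_16_2, pvTB_2_2, pvTB_10_2, pvTB_4_2, pvTB_12_2, pvTB_8_2, pvTB_32_2, pvTB_64_2]
  simp only [Bool.and_true, Bool.and_false, Bool.or_false, Bool.false_or, Nat.zero_testBit]
  try ac_rfl

theorem pvExcBit_2 (ct : String) :
    (pvAccum ct).2.testBit 2 = (["loan", "credit", "financing", "liability", "deposit"].any (fun term => PySem.Str.isIn term ct)) := by
  rw [pvAccum, (pvFold_testBit pvKeyTab ct (0,0) 2).2]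
  simp only [pvKeyTab, List.any_cons, List.any_nil]
  simp only [pvTB_7_2, pvTB_1_2, pvTB_4_2]
  simp only [Bool.and_true, Bool.and_false, Bool.or_false, Bool.false_or, Nat.zero_testBit]
  try ac_rfl

theorem pvIncBit_3 (ct : String) :
    (pvAccum ct).1.testBit 3 = (["liability", "deposit", "payable", "debt", "borrowing", "obligation", "due", "accrued", "customer", "demand", "time", "savings"].any (fun term => PySem.Str.isIn term ct)) := by
  rw [pvAccum, (pvFold_testBit pvKeyTab ct (0,0) 3).1]
  simp only [pvKeyTab, List.any_cons, List.any_nil]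
  simp only [pvTB_1_3, pvTB_16_3, pvTB_2_3, pvTB_10_3, pvTB_4_3, pvTB_12_3, pvTB_8_3, pvTB_32_3, pvTB_64_3]
  simp only [Bool.and_true, Bool.and_false, Bool.or_false, Bool.false_or, Nat.zero_testBit]
  try ac_rfl

theorem pvExcBit_3 (ct : String) : (pvAccum ct).2.testBit 3 = false := by
  rw [pvAccum, (pvFold_testBit pvKeyTab ct (0,0) 3).2]
  simp only [pvKeyTab, List.any_cons, List.any_nil]
  simp only [pvTB_7_3, pvTB_1_3, pvTB_4_3]
  try simp

theorem pvIncBit_4 (ct : String) :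
    (pvAccum ct).1.testBit 4 = (["loan", "credit", "financing", "mortgage", "commercial", "consumer", "lease", "allowance", "provision", "impairment", "chargeoff", "nonperforming"].any (fun term => PySem.Str.isIn term ct)) := by
  rw [pvAccum, (pvFold_testBit pvKeyTab ct (0,0) 4).1]
  simp only [pvKeyTab, List.any_cons, List.any_nil]
  simp only [pvTB_1_4, pvTB_16_4, pvTB_2_4, pvTB_10_4, pvTB_4_4, pvTB_12_4, pvTB_8_4, pvTB_32_4, pvTB_64_4]
  simp only [Bool.and_true, Bool.and_false, Bool.or_false, Bool.false_or, Nat.zero_testBit]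
  try ac_rfl

theorem pvExcBit_4 (ct : String) : (pvAccum ct).2.testBit 4 = false := by
  rw [pvAccum, (pvFold_testBit pvKeyTab ct (0,0) 4).2]
  simp only [pvKeyTab, List.any_cons, List.any_nil]
  simp only [pvTB_7_4, pvTB_1_4, pvTB_4_4]
  try simp

theorem pvIncBit_5 (ct : String) :
    (pvAccum ct).1.testBit 5 = (["revenue", "income", "interest", "fee", "earnings", "profit", "gain", "loss", "margin", "yield", "dividend", "commission"].any (fun term => PySem.Str.isIn term ct)) := by
  rw [pvAccum, (pvFold_testBit pvKeyTab ct (0,0) 5).1]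
  simp only [pvKeyTab, List.any_cons, List.any_nil]
  simp only [pvTB_1_5, pvTB_16_5, pvTB_2_5, pvTB_10_5, pvTB_4_5, pvTB_12_5, pvTB_8_5, pvTB_32_5, pvTB_64_5]
  simp only [Bool.and_true, Bool.and_false, Bool.or_false, Bool.false_or, Nat.zero_testBit]
  try ac_rfl

theorem pvExcBit_5 (ct : String) : (pvAccum ct).2.testBit 5 = false := by
  rw [pvAccum, (pvFold_testBit pvKeyTab ct (0,0) 5).2]
  simp only [pvKeyTab, List.any_cons, List.any_nil]
  simp only [pvTB_7_5, pvTB_1_5, pvTB_4_5]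
  try simp

theorem pvIncBit_6 (ct : String) :
    (pvAccum ct).1.testBit 6 = (["capital", "risk", "tier", "ratio", "adequacy", "leverage", "regulatory", "basel", "rwa", "cet1", "buffer"].any (fun term => PySem.Str.isIn term ct)) := by
  rw [pvAccum, (pvFold_testBit pvKeyTab ct (0,0) 6).1]
  simp only [pvKeyTab, List.any_cons, List.any_nil]
  simp only [pvTB_1_6, pvTB_16_6, pvTB_2_6, pvTB_10_6, pvTB_4_6, pvTB_12_6, pvTB_8_6, pvTB_32_6, pvTB_64_6]
  simp only [Bool.and_true, Bool.and_false, Bool.or_false, Bool.false_or, Nat.zero_testBit]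
  try ac_rfl

theorem pvExcBit_6 (ct : String) : (pvAccum ct).2.testBit 6 = false := by
  rw [pvAccum, (pvFold_testBit pvKeyTab ct (0,0) 6).2]
  simp only [pvKeyTab, List.any_cons, List.any_nil]
  simp only [pvTB_7_6, pvTB_1_6, pvTB_4_6]
  try simp

-- the Int indices produced by enumerate, reduced to Nat literals
theorem pvIdx_0 : (0 : Int).toNat = 0 := by decide
theorem pvIdx_1 : (0 + 1 : Int).toNat = 1 := by decide
theorem pvIdx_2 : (0 + 1 + 1 : Int).toNat = 2 := by decide
theorem pvIdx_3 : (0 + 1 + 1 + 1 : Int).toNat = 3 := by decide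
theorem pvIdx_4 : (0 + 1 + 1 + 1 + 1 : Int).toNat = 4 := by decide
theorem pvIdx_5 : (0 + 1 + 1 + 1 + 1 + 1 : Int).toNat = 5 := by decide
theorem pvIdx_6 : (0 + 1 + 1 + 1 + 1 + 1 + 1 : Int).toNat = 6 := by decide

-- ===== VERDICT =====
theorem categorize_metric_balanced_spec : Claim_equal_categorize_metric_balanced := by
  intro metric_name metric_info _
  unfold Spec_categorize_metric_balanced
  simp only [categorize_metric_balanced, categorize_metric_balanced_alt]
  generalize (PySem.Str.lower metric_name ++ " " ++
    PySem.Str.lower (((PySem.Dict.mk metric_info).get? "label").getD "") ++ " " ++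
    PySem.Str.lower (((PySem.Dict.mk metric_info).get? "description").getD "")) = ct
  simp only [pvCategories, PySem.List.enumerate_cons, PySem.List.enumerate_nil, pvPick,
    pvIdx_0, pvIdx_1, pvIdx_2, pvIdx_3, pvIdx_4, pvIdx_5, pvIdx_6,
    pvIncBit_0, pvIncBit_1, pvIncBit_2, pvIncBit_3, pvIncBit_4, pvIncBit_5, pvIncBit_6,
    pvExcBit_0, pvExcBit_1, pvExcBit_2, pvExcBit_3, pvExcBit_4, pvExcBit_5, pvExcBit_6,
    Bool.not_false, Bool.and_true]
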